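-- pv_equiv track=rewrite | github.com/3004mochalov/GitPetProjects | Универ/ТИИАБД/ПР1/2s.py | register_users
-- ===== SOURCE A (Python) =====
-- def register_users(n, queries):
--     db = set()
--     results = []
--
--     for query in queries:
--         if query not in db:
--             db.add(query)
--             results.append("OK")
--         else:
--             i = 1
--             while f"{query}{i}" in db:
--                 i += 1
--             new_name = f"{query}{i}"
--             db.add(new_name)
--             results.append(new_name)
--
--     return results
-- ===== SOURCE B (Python) =====
-- def register_users(n, queries):
--     # One dict does double duty: its keys are the registered names, and the value
--     # stored under a base name is the next suffix index worth trying (it only advances).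
--     nxt = {}
--
--     def fresh(name):
--         if name not in nxt:
--             nxt[name] = 1
--             return "OK"
--         i = nxt[name]
--         while f"{name}{i}" in nxt:
--             i += 1
--         nxt[name] = i + 1
--         new_name = f"{name}{i}"
--         nxt[new_name] = 1
--         return new_name
--
--     return [fresh(q) for q in queries]
-- ===== Notes on version B (the rewrite author's own statement) =====
-- stated objective: faster
-- what changed: B replaces A's set+list fold by a single dict whose keys are the registered names and whose value under a base name caches the next suffix index worth trying, so the duplicate-suffix scan resumes where the previous scan for that name stopped instead of restarting from 1; the output is built by mapping a helper over the queries.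
import Mathlib
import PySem

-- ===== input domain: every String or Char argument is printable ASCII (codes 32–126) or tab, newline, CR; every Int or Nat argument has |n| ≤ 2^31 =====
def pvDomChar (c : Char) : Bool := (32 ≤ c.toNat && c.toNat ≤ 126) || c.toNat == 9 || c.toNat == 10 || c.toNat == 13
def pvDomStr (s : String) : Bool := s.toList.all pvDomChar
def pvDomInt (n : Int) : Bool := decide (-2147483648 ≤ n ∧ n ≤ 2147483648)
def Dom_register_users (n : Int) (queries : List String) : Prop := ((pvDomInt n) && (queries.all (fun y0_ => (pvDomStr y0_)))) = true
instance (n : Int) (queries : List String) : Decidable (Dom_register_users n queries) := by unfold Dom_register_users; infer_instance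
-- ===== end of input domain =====

-- B replaces A's set+list fold by a single dict (keys = registered names, value under a base
-- name = cached next suffix index to try), so duplicate-suffix scans resume instead of restarting.

-- ===== PORT A =====
-- A's while loop: scan i = 1, 2, … for the first "query+str(i)" not in db.
-- Fuel db.length + 1 only makes the recursion total; db holds at most db.length of the scanned
-- names, so the scan always ends on a miss before the fuel runs out.
def pvFindA (db : PySem.Set String) (q : String) : Int → Nat → Int
  | i, 0 => i
  | i, f + 1 =>
    if PySem.Set.contains db (q ++ PySem.Int.toStr i) then pvFindA db q (i + 1) f else i

def pvStepA (st : PySem.Set String × List String) (query : String) :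
    PySem.Set String × List String :=
  if PySem.Set.contains st.1 query = false then
    (PySem.Set.add st.1 query, st.2 ++ ["OK"])
  else
    let i := pvFindA st.1 query 1 (st.1.length + 1)
    let newName := query ++ PySem.Int.toStr i
    (PySem.Set.add st.1 newName, st.2 ++ [newName])

def register_users (n : Int) (queries : List String) : List String :=
  (queries.foldl pvStepA (PySem.Set.empty, [])).2

-- ===== PORT B =====
-- B's while loop: the same kind of scan, but over the dict's keys and started at the cached
-- pointer nxt[name]; fuel d.size + 1 only makes it total (same pigeonhole argument).
def pvScan (d : PySem.Dict String Int) (q : String) : Int → Nat → Int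
  | i, 0 => i
  | i, f + 1 =>
    if (PySem.Dict.get? d (q ++ PySem.Int.toStr i)).isSome then pvScan d q (i + 1) f else i

-- B's helper 'fresh': returns the updated dict together with the string to output.
def pvFresh (d : PySem.Dict String Int) (name : String) :
    PySem.Dict String Int × String :=
  match PySem.Dict.get? d name with
  | none => (PySem.Dict.insert d name 1, "OK")
  | some c =>
    let i := pvScan d name c (d.items.length + 1)
    let newName := name ++ PySem.Int.toStr i
    ((PySem.Dict.insert (PySem.Dict.insert d name (i + 1)) newName 1), newName)

-- the list comprehension [fresh(q) for q in queries], threading the dict state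
def pvRun (d : PySem.Dict String Int) : List String → List String
  | [] => []
  | q :: qs =>
    let st := pvFresh d q
    st.2 :: pvRun st.1 qs

def register_users_alt (n : Int) (queries : List String) : List String :=
  pvRun PySem.Dict.empty queries

-- ===== PRECONDITION & SPEC =====
def Spec_register_users (n : Int) (queries : List String) (out : List String) : Prop := out = register_users_alt n queries
instance (n : Int) (queries : List String) (out : List String) : Decidable (Spec_register_users n queries out) := by unfold Spec_register_users; infer_instance

-- ===== CLAIM (what is proved, stated in full; the proofs are below) =====
def Claim_equal_register_users : Prop := ∀ (n : Int) (queries : List String), Dom_register_users n queries → Spec_register_users n queries (register_users n queries)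

-- ===== LEMMAS AND PROOFS =====

-- decimal digit list of n, most significant first (what Nat.toDigits 10 computes)
def pvRep (m : Nat) : List Char :=
  if _ : m < 10 then [Nat.digitChar m]
  else pvRep (m / 10) ++ [Nat.digitChar (m % 10)]
decreasing_by exact Nat.div_lt_self (by omega) (by omega)

lemma pvDigitChar_inj {a b : Nat} (ha : a < 10) (hb : b < 10)
    (h : Nat.digitChar a = Nat.digitChar b) : a = b := by
  interval_cases a <;> interval_cases b <;> simp_all [Nat.digitChar]

lemma pvDigitChar_ne_dash {a : Nat} (ha : a < 10) : Nat.digitChar a ≠ '-' := by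
  interval_cases a <;> decide

lemma pvRep_ne_nil (m : Nat) : pvRep m ≠ [] := by
  unfold pvRep
  split <;> simp

lemma pvDash_not_mem_pvRep (m : Nat) : '-' ∉ pvRep m := by
  induction m using Nat.strong_induction_on with
  | _ m ih =>
    unfold pvRep
    split
    next h => simp [Ne.symm (pvDigitChar_ne_dash h)]
    next h =>
      have := ih (m / 10) (Nat.div_lt_self (by omega) (by omega))
      simp [this, Ne.symm (pvDigitChar_ne_dash (Nat.mod_lt _ (by omega)))]

lemma pvRep_inj : ∀ {a b : Nat}, pvRep a = pvRep b → a = b := by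
  intro a
  induction a using Nat.strong_induction_on with
  | _ a ih =>
    intro b h
    unfold pvRep at h
    split at h
    next h1 =>
      split at h
      next h2 => simpa using pvDigitChar_inj h1 h2 (by simpa using h)
      next h2 =>
        exfalso
        rcases List.exists_cons_of_ne_nil (pvRep_ne_nil (b / 10)) with ⟨c, t, hct⟩
        rw [hct] at h
        simp at h
    next h1 =>
      split at h
      next h2 =>
        exfalso
        rcases List.exists_cons_of_ne_nil (pvRep_ne_nil (a / 10)) with ⟨c, t, hct⟩
        rw [hct] at h
        simp at h
      next h2 =>
        have := List.append_singleton_inj.mp h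
        have hd : a / 10 = b / 10 :=
          ih (a / 10) (Nat.div_lt_self (by omega) (by omega)) this.1
        have hm : a % 10 = b % 10 :=
          pvDigitChar_inj (Nat.mod_lt _ (by omega)) (Nat.mod_lt _ (by omega)) this.2
        omega

lemma pvToDigitsCore_eq : ∀ (f m : Nat) (ds : List Char), m < f →
    Nat.toDigitsCore 10 f m ds = pvRep m ++ ds := by
  intro f
  induction f with
  | zero => omega
  | succ f ihf =>
    intro m ds hm
    rw [Nat.toDigitsCore]
    by_cases h10 : m < 10
    · have : m / 10 = 0 := Nat.div_eq_of_lt h10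
      simp only [this]
      rw [pvRep, dif_pos h10, Nat.mod_eq_of_lt h10]
      simp
    · have hne : ¬ m / 10 = 0 := by
        intro h; omega
      simp only [if_neg hne]
      rw [ihf (m / 10) _ (by omega)]
      conv_rhs => rw [pvRep]
      rw [dif_neg h10]
      simp

lemma pvToDigits_eq (m : Nat) : Nat.toDigits 10 m = pvRep m := by
  rw [Nat.toDigits, pvToDigitsCore_eq (m + 1) m [] (by omega)]
  simp

lemma pvToChars_inj : ∀ {a b : Int}, PySem.Int.toChars a = PySem.Int.toChars b → a = b := by
  intro a b h
  unfold PySem.Int.toChars at h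
  split at h <;> rename_i ha <;> split at h <;> rename_i hb
  · simp only [List.cons.injEq, true_and] at h
    rw [pvToDigits_eq, pvToDigits_eq] at h
    have := pvRep_inj h
    omega
  · exfalso
    rw [pvToDigits_eq, pvToDigits_eq] at h
    exact pvDash_not_mem_pvRep b.toNat (by rw [← h]; simp)
  · exfalso
    rw [pvToDigits_eq, pvToDigits_eq] at h
    exact pvDash_not_mem_pvRep a.toNat (by rw [h]; simp)
  · rw [pvToDigits_eq, pvToDigits_eq] at h
    have := pvRep_inj h
    omega

lemma pvToChars_ne_nil (a : Int) : PySem.Int.toChars a ≠ [] := by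
  unfold PySem.Int.toChars
  split
  · simp
  · rw [pvToDigits_eq]; exact pvRep_ne_nil _

lemma pvName_inj {q : String} {a b : Int}
    (h : q ++ PySem.Int.toStr a = q ++ PySem.Int.toStr b) : a = b := by
  have h2 := congrArg String.toList h
  rw [String.toList_append, String.toList_append] at h2
  have h3 := List.append_cancel_left h2
  rw [PySem.Int.toList_toStr, PySem.Int.toList_toStr] at h3
  exact pvToChars_inj h3

lemma pvName_ne_base (q : String) (a : Int) : q ++ PySem.Int.toStr a ≠ q := by
  intro h
  have h2 := congrArg String.toList h
  rw [String.toList_append, PySem.Int.toList_toStr] at h2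
  exact pvToChars_ne_nil a (by simpa using h2)

-- the loop invariant tying A's state to B's: the dict's keys are exactly A's set,
-- and the value cached under a key is a valid resume point for its suffix scan.
def pvInv (db : PySem.Set String) (d : PySem.Dict String Int) : Prop :=
  (∀ s : String, PySem.Set.contains db s = (PySem.Dict.get? d s).isSome) ∧
  (∀ q c, PySem.Dict.get? d q = some c → 1 ≤ c ∧ ∀ j : Int, 1 ≤ j → j < c →
      PySem.Set.contains db (q ++ PySem.Int.toStr j) = true)

lemma pvContains_add_of (db : PySem.Set String) (x y : String)
    (h : PySem.Set.contains db y = true) :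
    PySem.Set.contains (PySem.Set.add db x) y = true := by
  rw [PySem.Set.contains_iff] at *
  rw [PySem.Set.mem_add]
  exact Or.inl h

-- pigeonhole: among db.length + 1 consecutive candidate names at least one is not in db
lemma pvExists_miss (db : PySem.Set String) (q : String) (i : Int) :
    ∃ k : Nat, k < db.length + 1 ∧
      PySem.Set.contains db (q ++ PySem.Int.toStr (i + k)) = false := by
  by_contra hc
  push Not at hc
  have hall : ∀ k : Nat, k < db.length + 1 → (q ++ PySem.Int.toStr (i + k)) ∈ db := by
    intro k hk
    exact (PySem.Set.contains_iff _ _).mp (Bool.ne_false_iff.mp (hc k hk))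
  set M := (List.range (db.length + 1)).map (fun k : Nat => q ++ PySem.Int.toStr (i + (k : Int))) with hM
  have hnodup : M.Nodup := by
    refine List.Nodup.map_on ?_ List.nodup_range
    intro a _ b _ hab
    have := pvName_inj hab
    omega
  have hsub : M ⊆ db := by
    intro x hx
    rw [hM, List.mem_map] at hx
    rcases hx with ⟨k, hk, rfl⟩
    exact hall k (List.mem_range.mp hk)
  have := (hnodup.subperm hsub).length_le
  simp [hM] at this

-- the same pigeonhole over the dict's keys, for B's fuel
lemma pvExists_missD (d : PySem.Dict String Int) (q : String) (i : Int) :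
    ∃ k : Nat, k < d.items.length + 1 ∧
      (PySem.Dict.get? d (q ++ PySem.Int.toStr (i + k))).isSome = false := by
  by_contra hc
  push Not at hc
  have hall : ∀ k : Nat, k < d.items.length + 1 →
      (q ++ PySem.Int.toStr (i + k)) ∈ PySem.Dict.keys d := by
    intro k hk
    have hsome := Bool.ne_false_iff.mp (hc k hk)
    by_contra hmemk
    rw [← PySem.Dict.get?_eq_none_iff_not_mem_keys] at hmemk
    rw [hmemk] at hsome
    exact absurd hsome (by decide)
  set M := (List.range (d.items.length + 1)).map (fun k : Nat => q ++ PySem.Int.toStr (i + (k : Int))) with hM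
  have hnodup : M.Nodup := by
    refine List.Nodup.map_on ?_ List.nodup_range
    intro a _ b _ hab
    have := pvName_inj hab
    omega
  have hsub : M ⊆ PySem.Dict.keys d := by
    intro x hx
    rw [hM, List.mem_map] at hx
    rcases hx with ⟨k, hk, rfl⟩
    exact hall k (List.mem_range.mp hk)
  have := (hnodup.subperm hsub).length_le
  simp [hM, PySem.Dict.keys] at this

-- first-free characterisation of A's scan (any sufficient fuel)
lemma pvFindA_spec (db : PySem.Set String) (q : String) :
    ∀ (F : Nat) (i : Int),
    (∃ k : Nat, k < F ∧ PySem.Set.contains db (q ++ PySem.Int.toStr (i + k)) = false) →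
    i ≤ pvFindA db q i F ∧
    PySem.Set.contains db (q ++ PySem.Int.toStr (pvFindA db q i F)) = false ∧
    ∀ j : Int, i ≤ j → j < pvFindA db q i F →
      PySem.Set.contains db (q ++ PySem.Int.toStr j) = true := by
  intro F
  induction F with
  | zero => intro i h; exact absurd h.choose_spec.1 (by omega)
  | succ f ihf =>
    intro i h
    rcases h with ⟨k, hk, hmiss⟩
    rw [pvFindA]
    by_cases hhit : PySem.Set.contains db (q ++ PySem.Int.toStr i) = true
    · rw [if_pos hhit]
      have hk0 : k ≠ 0 := by
        intro h0
        subst h0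
        simp only [Nat.cast_zero, add_zero] at hmiss
        rw [hmiss] at hhit
        exact absurd hhit (by decide)
      obtain ⟨k', rfl⟩ := Nat.exists_eq_succ_of_ne_zero hk0
      have hstep : i + (↑(k' + 1) : Int) = (i + 1) + ↑k' := by push_cast; ring
      have ih := ihf (i + 1) ⟨k', by omega, by rw [← hstep]; exact hmiss⟩
      refine ⟨by omega, ih.2.1, ?_⟩
      intro j hj1 hj2
      rcases eq_or_lt_of_le hj1 with rfl | hj
      · exact hhit
      · exact ih.2.2 j (by omega) hj2
    · rw [if_neg hhit]
      exact ⟨le_refl i, Bool.eq_false_iff.mpr hhit, fun j h1 h2 => absurd (lt_of_le_of_lt h1 h2) (lt_irrefl i)⟩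

-- under the invariant B's dict scan is pointwise A's set scan (same fuel, same start)
lemma pvScan_eq_pvFindA (db : PySem.Set String) (d : PySem.Dict String Int)
    (hmem : ∀ s : String, PySem.Set.contains db s = (PySem.Dict.get? d s).isSome)
    (q : String) : ∀ (F : Nat) (i : Int), pvScan d q i F = pvFindA db q i F := by
  intro F
  induction F with
  | zero => intro i; rfl
  | succ f ihf =>
    intro i
    rw [pvScan, pvFindA, ← hmem]
    split <;> simp_all

-- the per-query step: A's fold step appends exactly B's fresh output, and the invariant survives
lemma pvStep_eq (db : PySem.Set String) (d : PySem.Dict String Int) (res : List String)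
    (q : String) (hinv : pvInv db d) :
    (pvStepA (db, res) q).2 = res ++ [(pvFresh d q).2] ∧
    pvInv (pvStepA (db, res) q).1 (pvFresh d q).1 := by
  obtain ⟨hmem, hptr⟩ := hinv
  rcases hget : PySem.Dict.get? d q with _ | c
  · -- fresh name: A appends "OK", B inserts q ↦ 1
    have hq : PySem.Set.contains db q = false := by
      rw [hmem, hget]; rfl
    have hA : pvStepA (db, res) q = (PySem.Set.add db q, res ++ ["OK"]) := by
      unfold pvStepA; rw [if_pos hq]
    have hB : pvFresh d q = (PySem.Dict.insert d q 1, "OK") := by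
      simp only [pvFresh, hget]
    rw [hA, hB]
    refine ⟨rfl, ?_, ?_⟩
    · intro s
      dsimp only
      by_cases hs : s = q
      · subst hs
        rw [PySem.Dict.get?_insert_self]
        have hadd : PySem.Set.contains (PySem.Set.add db s) s = true := by
          rw [PySem.Set.contains_iff, PySem.Set.mem_add]; exact Or.inr rfl
        rw [hadd]; rfl
      · rw [PySem.Dict.get?_insert_of_ne _ _ hs, ← hmem]
        rw [Bool.eq_iff_iff, PySem.Set.contains_iff, PySem.Set.contains_iff,
          PySem.Set.mem_add]
        simp [hs]
    · intro q' c' hget'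
      dsimp only at hget' ⊢
      by_cases hs : q' = q
      · subst hs
        rw [PySem.Dict.get?_insert_self] at hget'
        injection hget' with hc'
        exact ⟨by omega, fun j h1 h2 => by omega⟩
      · rw [PySem.Dict.get?_insert_of_ne _ _ hs] at hget'
        obtain ⟨h1, h2⟩ := hptr q' c' hget'
        exact ⟨h1, fun j hj1 hj2 => pvContains_add_of _ _ _ (h2 j hj1 hj2)⟩
  · -- duplicate: both scan for the first free suffix and register it
    have hq : PySem.Set.contains db q = true := by rw [hmem, hget]; rfl
    have hc1 := hptr q c hget
    have hA0 := pvFindA_spec db q (db.length + 1) 1 (pvExists_miss db q 1)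
    have hB0 := pvFindA_spec db q (d.items.length + 1) c (by
      rcases pvExists_missD d q c with ⟨k, hk, hkm⟩
      exact ⟨k, hk, by rw [hmem]; exact hkm⟩)
    set rA := pvFindA db q 1 (db.length + 1) with hrA
    set rB := pvFindA db q c (d.items.length + 1) with hrB
    have heq : rA = rB := by
      rcases lt_trichotomy rA rB with h | h | h
      · have hhit : PySem.Set.contains db (q ++ PySem.Int.toStr rA) = true := by
          rcases Int.lt_or_le rA c with h2 | h2
          · exact hc1.2 rA hA0.1 h2
          · exact hB0.2.2 rA h2 h
        rw [hA0.2.1] at hhit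
        exact absurd hhit (by decide)
      · exact h
      · have hhit : PySem.Set.contains db (q ++ PySem.Int.toStr rB) = true :=
          hA0.2.2 rB (le_trans hc1.1 hB0.1) h
        rw [hB0.2.1] at hhit
        exact absurd hhit (by decide)
    have hA : pvStepA (db, res) q =
        (PySem.Set.add db (q ++ PySem.Int.toStr rA), res ++ [q ++ PySem.Int.toStr rA]) := by
      unfold pvStepA
      rw [if_neg (fun h => by rw [hq] at h; exact Bool.noConfusion h)]
    have hB : pvFresh d q =
        (PySem.Dict.insert (PySem.Dict.insert d q (rB + 1)) (q ++ PySem.Int.toStr rB) 1,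
          q ++ PySem.Int.toStr rB) := by
      simp only [pvFresh, hget, pvScan_eq_pvFindA db d hmem, ← hrB]
    rw [hA, hB, heq]
    set nm := q ++ PySem.Int.toStr rB with hnm
    have hnmq : nm ≠ q := pvName_ne_base q rB
    refine ⟨rfl, ?_, ?_⟩
    · intro s
      dsimp only
      by_cases hs : s = nm
      · subst hs
        rw [PySem.Dict.get?_insert_self]
        have hadd : PySem.Set.contains (PySem.Set.add db nm) nm = true := by
          rw [PySem.Set.contains_iff, PySem.Set.mem_add]; exact Or.inr rfl
        rw [hadd]; rfl
      · rw [PySem.Dict.get?_insert_of_ne _ _ hs]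
        by_cases hsq : s = q
        · subst hsq
          rw [PySem.Dict.get?_insert_self]
          rw [pvContains_add_of db nm _ hq]; rfl
        · rw [PySem.Dict.get?_insert_of_ne _ _ hsq, ← hmem]
          rw [Bool.eq_iff_iff, PySem.Set.contains_iff, PySem.Set.contains_iff,
            PySem.Set.mem_add]
          simp [hs]
    · intro q' c' hget'
      dsimp only at hget' ⊢
      by_cases hs : q' = nm
      · subst hs
        rw [PySem.Dict.get?_insert_self] at hget'
        injection hget' with hc'
        exact ⟨by omega, fun j h1 h2 => by omega⟩
      · rw [PySem.Dict.get?_insert_of_ne _ _ hs] at hget'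
        by_cases hsq : q' = q
        · subst hsq
          rw [PySem.Dict.get?_insert_self] at hget'
          injection hget' with hc'
          subst hc'
          refine ⟨by have := hB0.1; have := hc1.1; omega, ?_⟩
          intro j hj1 hj2
          rcases lt_trichotomy j rB with hlt | hj | hgt
          · rcases Int.lt_or_le j c with h2 | h2
            · exact pvContains_add_of _ _ _ (hc1.2 j hj1 h2)
            · exact pvContains_add_of _ _ _ (hB0.2.2 j h2 hlt)
          · subst hj
            rw [PySem.Set.contains_iff, PySem.Set.mem_add]
            exact Or.inr rfl
          · omega
        · rw [PySem.Dict.get?_insert_of_ne _ _ hsq] at hget'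
          obtain ⟨h1, h2⟩ := hptr q' c' hget'
          exact ⟨h1, fun j hj1 hj2 => pvContains_add_of _ _ _ (h2 j hj1 hj2)⟩

lemma pvFold_eq : ∀ (qs : List String) (db : PySem.Set String)
    (d : PySem.Dict String Int) (res : List String), pvInv db d →
    (qs.foldl pvStepA (db, res)).2 = res ++ pvRun d qs := by
  intro qs
  induction qs with
  | nil => intro db d res _; simp [pvRun]
  | cons q qs ih =>
    intro db d res hinv
    obtain ⟨hout, hinv'⟩ := pvStep_eq db d res q hinv
    have hpair : pvStepA (db, res) q = ((pvStepA (db, res) q).1, res ++ [(pvFresh d q).2]) :=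
      Prod.ext_iff.mpr ⟨rfl, hout⟩
    rw [List.foldl_cons, hpair,
      ih ((pvStepA (db, res) q).1) ((pvFresh d q).1) (res ++ [(pvFresh d q).2]) hinv']
    simp [pvRun]

-- ===== VERDICT (by name: the statement is the Claim_ definition above) =====
theorem register_users_spec : Claim_equal_register_users := by
  intro n queries _
  unfold Spec_register_users register_users register_users_alt
  refine pvFold_eq queries PySem.Set.empty PySem.Dict.empty [] ⟨?_, ?_⟩
  · intro s; rfl
  · intro q c h; simp [PySem.Dict.get?, PySem.Dict.empty] at h
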